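-- pv_equiv track=rewrite | github.com/BSDinis/fp_proj | palavra_potencial.py | e_par_para_potencial
-- ===== SOURCE A (Python) =====
-- maiusculas = ('A','B','C','D','E','F','G','H','I','J','L','M','N','O', \
-- 				'P','Q','R','S','T','U','V','X','Z')
--
-- def e_par_para_potencial(arg1, arg2):
-- 	'''funcao auxiliar
-- 	e_par_para_potencial: universal x universal -> logico'''
--
-- 	if isinstance(arg1, str) and isinstance(arg2, tuple):
-- 		for c in arg1:
-- 			if c not in maiusculas: # verifica que a string so tem maiusculas
-- 				return 2 # codigo argumentos invalidos
--
-- 		for c in arg2: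
-- 			if c not in maiusculas: # verifica que o tuplo so tem maiusculas
-- 				return 2 # codigo argumentos invalidos
--
-- 			i = 0
-- 			while i < len(arg1):
-- 				if arg1[i] == c:
-- 					arg1 = arg1[:i] + arg1[i + 1:] # retira o caracter da string
-- 					i = len(arg1) # forca a saida, so pode retirar um caracter de cada vez
--
-- 				i = i + 1
--
-- 		if len(arg1) == 0: # nao pode haver digitos que nao estao no tuplo
-- 	   		return 0 # codigo de que passou
-- 		else:
-- 			return 1 # a palavra nao e valida
--
-- 	else:
-- 		return 2 # codigo argumentos invalidos
-- ===== SOURCE B (Python) =====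
-- maiusculas = ('A','B','C','D','E','F','G','H','I','J','L','M','N','O', \
-- 				'P','Q','R','S','T','U','V','X','Z')
--
-- def e_par_para_potencial(arg1, arg2):
-- 	'''funcao auxiliar
-- 	e_par_para_potencial: universal x universal -> logico'''
-- 	if not (isinstance(arg1, str) and isinstance(arg2, tuple)):
-- 		return 2
-- 	letters = list(arg1)
-- 	if any(c not in maiusculas for c in letters) or any(c not in maiusculas for c in arg2):
-- 		return 2
-- 	return 0 if all(letters.count(c) <= arg2.count(c) for c in letters) else 1
-- ===== Notes on version B (the rewrite author's own statement) =====
-- stated objective: simpler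
-- what changed: A consumes the string by repeatedly scanning it and deleting one matching character per tuple element; B never mutates anything and instead compares per-letter frequencies (count in arg1 <= count in arg2) after the same two validity guards.
import Mathlib
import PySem

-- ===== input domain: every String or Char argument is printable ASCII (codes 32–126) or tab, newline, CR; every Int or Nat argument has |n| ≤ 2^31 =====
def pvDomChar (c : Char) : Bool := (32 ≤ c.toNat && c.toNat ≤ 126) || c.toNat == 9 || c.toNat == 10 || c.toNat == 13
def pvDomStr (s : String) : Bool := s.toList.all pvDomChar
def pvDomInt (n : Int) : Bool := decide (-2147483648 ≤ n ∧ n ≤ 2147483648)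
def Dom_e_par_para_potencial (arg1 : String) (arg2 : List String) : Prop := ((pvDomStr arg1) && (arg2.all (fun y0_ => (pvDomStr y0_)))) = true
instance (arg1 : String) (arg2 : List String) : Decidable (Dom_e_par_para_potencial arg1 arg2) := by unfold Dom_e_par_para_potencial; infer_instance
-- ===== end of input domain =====

-- B replaces A's repeated scan-and-delete consumption of the string by a per-letter
-- frequency comparison (count in arg1 ≤ count in arg2); objective: simpler (not faster).

-- ===== PORT A =====
def pvMaiusculas : List String :=
  ["A","B","C","D","E","F","G","H","I","J","L","M","N","O",
   "P","Q","R","S","T","U","V","X","Z"]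

-- the `while i < len(arg1)` loop; iterating over the string's chars, a Python char is a
-- 1-char string, hence the `String.ofList [·]` comparison.  After a removal Python sets
-- i = len(arg1) and then i = i + 1, so the loop exits at once: the removal branch returns.
-- arg1[:i] + arg1[i+1:] with 0 ≤ i < len is exactly take i ++ drop (i+1).
def pvInner (s : List Char) (c : String) (i : Nat) : List Char :=
  if h : i < s.length then
    if String.ofList [s[i]] == c then
      s.take i ++ s.drop (i + 1)
    else
      pvInner s c (i + 1)
  else s
termination_by s.length - i

-- the `for c in arg2` loop with its early `return 2` and the final length test
def pvOuter (s : List Char) (l : List String) : Int :=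
  match l with
  | [] => if s.length = 0 then 0 else 1
  | c :: rest => if pvMaiusculas.contains c then pvOuter (pvInner s c 0) rest else 2

def e_par_para_potencial (arg1 : String) (arg2 : List String) : Int :=
  -- `for c in arg1: if c not in maiusculas: return 2`
  if arg1.toList.all (fun ch => pvMaiusculas.contains (String.ofList [ch])) then
    pvOuter arg1.toList arg2
  else 2

-- ===== PORT B =====
def e_par_para_potencial_alt (arg1 : String) (arg2 : List String) : Int :=
  let letters := arg1.toList.map (fun ch => String.ofList [ch])   -- list(arg1)
  if letters.any (fun c => !(pvMaiusculas.contains c))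
     || arg2.any (fun c => !(pvMaiusculas.contains c)) then 2
  else if letters.all (fun c => letters.count c ≤ arg2.count c) then 0 else 1

-- ===== PRECONDITION & SPEC =====
def Spec_e_par_para_potencial (arg1 : String) (arg2 : List String) (out : Int) : Prop := out = e_par_para_potencial_alt arg1 arg2
instance (arg1 : String) (arg2 : List String) (out : Int) : Decidable (Spec_e_par_para_potencial arg1 arg2 out) := by unfold Spec_e_par_para_potencial; infer_instance

-- ===== CLAIM (what is proved, stated in full; the proofs are below) =====
def Claim_equal_e_par_para_potencial : Prop := ∀ (arg1 : String) (arg2 : List String), Dom_e_par_para_potencial arg1 arg2 → Spec_e_par_para_potencial arg1 arg2 (e_par_para_potencial arg1 arg2)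

-- ===== LEMMAS AND PROOFS =====


theorem pvInner_eq (s : List Char) (c : String) (i : Nat) :
    pvInner s c i = s.take i ++ (s.drop i).eraseP (fun ch => String.ofList [ch] == c) := by
  fun_induction pvInner s c i with
  | case1 i h hbeq =>
    rw [List.drop_eq_getElem_cons h, List.eraseP_cons]
    simp [hbeq]
  | case2 i h hbeq ih =>
    have hb : (String.ofList [s[i]] == c) = false := by simpa using hbeq
    rw [ih, List.drop_eq_getElem_cons h, List.eraseP_cons, hb, Bool.cond_false,
      List.take_succ_eq_append_getElem h, List.append_assoc, List.singleton_append]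
  | case3 i h =>
    rw [List.take_of_length_le (by omega), List.drop_eq_nil_of_le (by omega)]
    simp

theorem pvInner_map (s : List Char) (c : String) :
    (pvInner s c 0).map (fun ch => String.ofList [ch]) =
      (s.map (fun ch => String.ofList [ch])).erase c := by
  rw [pvInner_eq, List.erase_eq_eraseP' c, List.eraseP_map]
  rfl

theorem pvOuter_invalid (l : List String) (s : List Char)
    (h : ∃ c ∈ l, ¬ pvMaiusculas.contains c = true) : pvOuter s l = 2 := by
  induction l generalizing s with
  | nil => simp at h
  | cons c rest ih =>
    by_cases hc : pvMaiusculas.contains c = true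
    · have : ∃ c' ∈ rest, ¬ pvMaiusculas.contains c' = true := by
        rcases h with ⟨c', hc', hnc⟩
        rcases List.mem_cons.1 hc' with rfl | hmem
        · exact absurd hc hnc
        · exact ⟨c', hmem, hnc⟩
      simp only [pvOuter]
      rw [if_pos hc]
      exact ih _ this
    · simp only [pvOuter]
      rw [if_neg hc]

theorem pvOuter_valid (l : List String) (s : List Char)
    (h : ∀ c ∈ l, pvMaiusculas.contains c = true) :
    pvOuter s l =
      if ((s.map (fun ch => String.ofList [ch])).diff l).length = 0 then 0 else 1 := by
  induction l generalizing s with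
  | nil => simp [pvOuter]
  | cons c rest ih =>
    have hc : pvMaiusculas.contains c = true := h c (by simp)
    simp only [pvOuter]
    rw [if_pos hc, ih _ (fun c' hm => h c' (by simp [hm])), List.diff_cons, pvInner_map]

theorem diff_len_zero (t l : List String) :
    (((t.diff l).length = 0)) ↔ ∀ c ∈ t, t.count c ≤ l.count c := by
  rw [List.length_eq_zero_iff, ← Multiset.coe_eq_zero, ← Multiset.coe_sub,
    tsub_eq_zero_iff_le, Multiset.le_iff_count]
  constructor
  · intro h c _
    simpa [Multiset.coe_count] using h c
  · intro h c
    by_cases hc : c ∈ t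
    · simpa [Multiset.coe_count] using h c hc
    · simp [Multiset.coe_count, List.count_eq_zero_of_not_mem hc]

-- ===== VERDICT (by name: the statement is the Claim_ definition above) =====
theorem e_par_para_potencial_spec : Claim_equal_e_par_para_potencial := by
  intro arg1 arg2 _
  unfold Spec_e_par_para_potencial
  by_cases h1 : (arg1.toList.all (fun ch => pvMaiusculas.contains (String.ofList [ch]))) = true
  · have hlet : ((arg1.toList.map (fun ch => String.ofList [ch])).any
        (fun c => !(pvMaiusculas.contains c))) = false := by
      simp only [List.any_map, List.any_eq_false, Function.comp]
      intro ch hm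
      simpa using List.all_eq_true.1 h1 ch hm
    by_cases h2 : (arg2.any (fun c => !(pvMaiusculas.contains c))) = true
    · have hx : ∃ c ∈ arg2, ¬ pvMaiusculas.contains c = true := by simpa using h2
      have hA : e_par_para_potencial arg1 arg2 = 2 := by
        unfold e_par_para_potencial
        rw [if_pos h1, pvOuter_invalid _ _ hx]
      have hB : e_par_para_potencial_alt arg1 arg2 = 2 := by
        unfold e_par_para_potencial_alt
        rw [if_pos (by rw [h2, Bool.or_true])]
      rw [hA, hB]
    · have hval : ∀ c ∈ arg2, pvMaiusculas.contains c = true := by simpa using h2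
      have hB : e_par_para_potencial_alt arg1 arg2 =
          if (arg1.toList.map (fun ch => String.ofList [ch])).all
              (fun c => (arg1.toList.map (fun ch => String.ofList [ch])).count c ≤ arg2.count c)
          then 0 else 1 := by
        unfold e_par_para_potencial_alt
        rw [if_neg (by simp only [hlet, Bool.false_or]; exact h2)]
      rw [hB]
      unfold e_par_para_potencial
      rw [if_pos h1, pvOuter_valid _ _ hval]
      simp only [diff_len_zero]
      by_cases h3 : ∀ c ∈ arg1.toList.map (fun ch => String.ofList [ch]),
          (arg1.toList.map (fun ch => String.ofList [ch])).count c ≤ arg2.count c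
      · rw [if_pos h3, if_pos (by simpa [List.all_eq_true] using h3)]
      · rw [if_neg h3, if_neg (by simpa [List.all_eq_true] using h3)]
  · have hlet : ((arg1.toList.map (fun ch => String.ofList [ch])).any
        (fun c => !(pvMaiusculas.contains c))) = true := by
      simp only [List.any_map, List.any_eq_true, Function.comp]
      rcases (by simpa using h1 : ∃ ch ∈ arg1.toList,
        ¬ pvMaiusculas.contains (String.ofList [ch]) = true) with ⟨ch, hm, hnc⟩
      exact ⟨ch, hm, by simpa using hnc⟩
    have hA : e_par_para_potencial arg1 arg2 = 2 := by
      unfold e_par_para_potencial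
      rw [if_neg h1]
    have hB : e_par_para_potencial_alt arg1 arg2 = 2 := by
      unfold e_par_para_potencial_alt
      rw [if_pos (by rw [hlet, Bool.true_or])]
    rw [hA, hB]
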